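-- pv_equiv track=rewrite | github.com/MartijnWallage/ready_set_bool | ex09.py | eval_set
-- ===== SOURCE A (Python) =====
-- def eval_set(formula: str, sets: list[list[int]]) -> list[int]:
--     """ Each variable in formula corresponds to a list in sets.
--         We use a stack with multiple sets, reduced to 1 set
--         in the end.
--     """
--     universe = {num for s in sets for num in s}
--     stack: list[set[int]] = []
--     for ch in formula:
--         if ch.isupper():
--             i = ord(ch) - ord('A')
--             stack.append(set(sets[i]))
--         elif ch == '!':
--             op = stack.pop()
--             stack.append(universe - op)
--         elif ch == '&':
--             right, left = stack.pop(), stack.pop()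
--             stack.append(left & right)
--         elif ch == '|':
--             right, left = stack.pop(), stack.pop()
--             stack.append(left | right)
--         elif ch == '^':
--             right, left = stack.pop(), stack.pop()
--             stack.append((left | right) - (left & right))
--         elif ch == '>':
--             right, left = stack.pop(), stack.pop()
--             stack.append((universe - left) | right)
--         elif ch == '=':
--             right, left = stack.pop(), stack.pop()
--             stack.append((left & right) | (universe - (left | right)))
--     if len(stack) != 1:
--         raise ValueError(f"Stack invalid: {stack!r}")
--
--     return sorted(stack.pop())
-- ===== SOURCE B (Python) =====
-- def eval_set(formula: str, sets: list[list[int]]) -> list[int]: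
--     """Element-wise evaluation: validate the RPN formula once, then for each
--     element of the universe evaluate the formula as a boolean predicate."""
--     depth = 0
--     for ch in formula:
--         if ch.isupper():
--             if ord(ch) - ord('A') >= len(sets):
--                 raise IndexError("variable out of range")
--             depth += 1
--         elif ch == '!':
--             if depth < 1:
--                 raise ValueError("invalid formula")
--         elif ch in '&|^>=':
--             if depth < 2:
--                 raise ValueError("invalid formula")
--             depth -= 1
--     if depth != 1:
--         raise ValueError("invalid formula")
--
--     universe = sorted({num for s in sets for num in s})
--     result = []
--     for x in universe:
--         st = []
--         for ch in formula:
--             if ch.isupper():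
--                 st.append(x in sets[ord(ch) - ord('A')])
--             elif ch == '!':
--                 st.append(not st.pop())
--             elif ch == '&':
--                 right, left = st.pop(), st.pop()
--                 st.append(left and right)
--             elif ch == '|':
--                 right, left = st.pop(), st.pop()
--                 st.append(left or right)
--             elif ch == '^':
--                 right, left = st.pop(), st.pop()
--                 st.append(left != right)
--             elif ch == '>':
--                 right, left = st.pop(), st.pop()
--                 st.append((not left) or right)
--             elif ch == '=':
--                 right, left = st.pop(), st.pop()
--                 st.append(left == right)
--         if st[0]:
--             result.append(x)
--     return result
-- ===== Notes on version B (the rewrite author's own statement) =====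
-- stated objective: alternative
-- what changed: Instead of maintaining a stack of Python sets and reducing it with set operations, B validates the formula once with a depth count and then evaluates the formula as a boolean predicate per universe element with a stack of booleans, collecting the elements in sorted order.
import Mathlib
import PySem

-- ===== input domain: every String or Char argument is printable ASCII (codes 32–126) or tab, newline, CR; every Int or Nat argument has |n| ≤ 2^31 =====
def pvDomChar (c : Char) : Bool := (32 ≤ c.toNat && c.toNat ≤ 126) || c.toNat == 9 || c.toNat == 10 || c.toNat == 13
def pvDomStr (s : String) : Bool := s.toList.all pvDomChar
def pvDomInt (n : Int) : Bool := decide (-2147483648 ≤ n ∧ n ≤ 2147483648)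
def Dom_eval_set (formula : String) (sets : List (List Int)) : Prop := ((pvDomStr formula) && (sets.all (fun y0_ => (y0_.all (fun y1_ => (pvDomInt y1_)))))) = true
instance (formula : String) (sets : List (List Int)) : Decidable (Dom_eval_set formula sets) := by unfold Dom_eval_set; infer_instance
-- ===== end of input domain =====

-- B replaces A's stack-of-sets reduction by a per-element boolean evaluation of the RPN
-- formula over the sorted universe (objective: alternative decomposition, similar cost).

-- ===== PORT A =====
-- One step of A's loop body; the head of the list is the top of Python's stack
-- (append = cons, pop = take the head). 'none' marks the IndexError of 'stack.pop()'
-- on an empty stack / of 'sets[i]' out of range.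
def evalStepA (uni : PySem.Set Int) (sets : List (List Int))
    (stack : List (PySem.Set Int)) (ch : Char) : Option (List (PySem.Set Int)) :=
  if PySem.Chars.isupper ch then
    match PySem.List.pyGet? sets ((ch.toNat : Int) - 65) with   -- sets[ord(ch) - ord('A')]
    | some s => some (PySem.Set.ofList s :: stack)
    | none => none
  else if ch = '!' then
    match stack with
    | op :: rest => some (PySem.Set.diff uni op :: rest)
    | [] => none
  else if ch = '&' then
    match stack with
    | right :: left :: rest => some (PySem.Set.inter left right :: rest)
    | _ => none
  else if ch = '|' then
    match stack with
    | right :: left :: rest => some (PySem.Set.union left right :: rest)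
    | _ => none
  else if ch = '^' then
    match stack with
    | right :: left :: rest =>
        some (PySem.Set.diff (PySem.Set.union left right) (PySem.Set.inter left right) :: rest)
    | _ => none
  else if ch = '>' then
    match stack with
    | right :: left :: rest => some (PySem.Set.union (PySem.Set.diff uni left) right :: rest)
    | _ => none
  else if ch = '=' then
    match stack with
    | right :: left :: rest =>
        some (PySem.Set.union (PySem.Set.inter left right)
              (PySem.Set.diff uni (PySem.Set.union left right)) :: rest)
    | _ => none
  else some stack

def eval_set (formula : String) (sets : List (List Int)) : List Int :=
  let uni : PySem.Set Int := PySem.Set.ofList sets.flatten   -- {num for s in sets for num in s}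
  match formula.toList.foldl (fun o ch => o.bind (fun st => evalStepA uni sets st ch)) (some []) with
  | some [s] => PySem.List.sorted s (fun x => x)             -- sorted(stack.pop())
  | _ => []   -- IndexError during the loop or ValueError at the end: excluded by Pre_eval_set

-- ===== PORT B =====
-- ch in '&|^>='
def pvIsBin (c : Char) : Bool := (c == '&') || (c == '|') || (c == '^') || (c == '>') || (c == '=')

-- B's up-front validity scan carrying the stack depth; 'none' marks B's raise
-- (IndexError for an out-of-range variable, ValueError for stack underflow).
def checkB (sets : List (List Int)) : List Char → Int → Option Int
  | [], depth => some depth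
  | ch :: rest, depth =>
    if PySem.Chars.isupper ch then
      if (sets.length : Int) ≤ (ch.toNat : Int) - 65 then none
      else checkB sets rest (depth + 1)
    else if ch = '!' then
      if depth < 1 then none else checkB sets rest depth
    else if pvIsBin ch then
      if depth < 2 then none else checkB sets rest (depth - 1)
    else checkB sets rest depth

-- st.pop(); after checkB has succeeded the stack is never empty here,
-- so the default on [] is unreachable.
def popB (st : List Bool) : Bool × List Bool :=
  match st with
  | b :: r => (b, r)
  | [] => (false, [])

-- one step of B's inner loop over the formula (boolean stack, head = top)
def stepB (x : Int) (sets : List (List Int)) (st : List Bool) (ch : Char) : List Bool :=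
  if PySem.Chars.isupper ch then
    decide (x ∈ PySem.List.pyGetD sets ((ch.toNat : Int) - 65) []) :: st   -- x in sets[...]
  else if ch = '!' then
    let p := popB st
    (!p.1) :: p.2
  else if ch = '&' then
    let p := popB st
    let q := popB p.2
    (q.1 && p.1) :: q.2
  else if ch = '|' then
    let p := popB st
    let q := popB p.2
    (q.1 || p.1) :: q.2
  else if ch = '^' then
    let p := popB st
    let q := popB p.2
    (q.1 != p.1) :: q.2
  else if ch = '>' then
    let p := popB st
    let q := popB p.2
    (!q.1 || p.1) :: q.2
  else if ch = '=' then
    let p := popB st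
    let q := popB p.2
    (q.1 == p.1) :: q.2
  else st

-- st[0] after the loop (the stack has exactly one element once checkB returned depth 1)
def evalTopB (x : Int) (sets : List (List Int)) (toks : List Char) : Bool :=
  match toks.foldl (stepB x sets) [] with
  | b :: _ => b
  | [] => false

def eval_set_alt (formula : String) (sets : List (List Int)) : List Int :=
  match checkB sets formula.toList 0 with
  | none => []                    -- B raises (excluded by Pre_eval_set)
  | some depth =>
    if depth = 1 then
      (PySem.List.sorted (PySem.Set.ofList sets.flatten) (fun x => x)).filter
        (fun x => evalTopB x sets formula.toList)
    else []                       -- B raises ValueError (excluded by Pre_eval_set)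

-- ===== PRECONDITION & SPEC =====
-- net stack effect of a token string: +1 per variable, -1 per binary operator
def pvWt (toks : List Char) : Int :=
  ((toks.filter (fun c => PySem.Chars.isupper c)).length : Int)
    - ((toks.filter (fun c => pvIsBin c)).length : Int)

-- Exactly the inputs on which A returns: every variable names an existing set
-- (else IndexError), no operator underflows the stack (else IndexError on pop),
-- and the whole formula leaves exactly one set (else ValueError).
def Pre_eval_set (formula : String) (sets : List (List Int)) : Prop :=
  (formula.toList.all (fun ch => !PySem.Chars.isupper ch || decide (ch.toNat - 65 < sets.length)) = true) ∧
  pvWt formula.toList = 1 ∧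
  (∀ i < formula.toList.length,
     (formula.toList.getD i ' ' = '!' → 1 ≤ pvWt (formula.toList.take i)) ∧
     (pvIsBin (formula.toList.getD i ' ') = true → 2 ≤ pvWt (formula.toList.take i)))
instance (formula : String) (sets : List (List Int)) : Decidable (Pre_eval_set formula sets) := by
  unfold Pre_eval_set; infer_instance

def pvWitness_eval_set : String × List (List Int) := ("AB&", [[1, 2], [2, 3]])

def Spec_eval_set (formula : String) (sets : List (List Int)) (out : List Int) : Prop := out = eval_set_alt formula sets
instance (formula : String) (sets : List (List Int)) (out : List Int) : Decidable (Spec_eval_set formula sets out) := by unfold Spec_eval_set; infer_instance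

-- ===== CLAIM (what is proved, stated in full; the proofs are below) =====
def Claim_equal_eval_set : Prop := ∀ (formula : String) (sets : List (List Int)), Dom_eval_set formula sets → Pre_eval_set formula sets → Spec_eval_set formula sets (eval_set formula sets)

-- ===== LEMMAS AND PROOFS =====

theorem upper_bounds (c : Char) (h : PySem.Chars.isupper c = true) : 65 ≤ c.toNat ∧ c.toNat ≤ 90 := by
  simp [PySem.Chars.isupper, Char.le_def, UInt32.le_iff_toNat_le] at h
  exact h

theorem not_bin_of_upper (c : Char) (h : PySem.Chars.isupper c = true) : pvIsBin c = false := by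
  cases hb : pvIsBin c
  · rfl
  · simp [pvIsBin] at hb
    have := upper_bounds c h
    rcases hb with ⟨⟨⟨hb | hb⟩ | hb⟩ | hb⟩ | hb <;> subst hb <;> simp at this <;> omega

def pvDelta (c : Char) : Int := if PySem.Chars.isupper c then 1 else if pvIsBin c then -1 else 0

theorem pvWt_nil : pvWt [] = 0 := rfl

theorem pvWt_cons (c : Char) (l : List Char) : pvWt (c :: l) = pvDelta c + pvWt l := by
  by_cases hu : PySem.Chars.isupper c = true
  · simp [pvWt, pvDelta, List.filter_cons, hu, not_bin_of_upper c hu]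
    push_cast; ring
  · by_cases hb : pvIsBin c = true
    · simp [pvWt, pvDelta, List.filter_cons, hu, hb]
      push_cast; ring
    · simp [pvWt, pvDelta, List.filter_cons, hu, hb]

theorem hok_tail (c : Char) (l : List Char) (d d' : Int) (hd' : d' = d + pvDelta c)
    (h : ∀ i < (c :: l).length,
      ((c :: l).getD i ' ' = '!' → 1 ≤ d + pvWt ((c :: l).take i)) ∧
      (pvIsBin ((c :: l).getD i ' ') = true → 2 ≤ d + pvWt ((c :: l).take i))) :
    ∀ i < l.length,
      (l.getD i ' ' = '!' → 1 ≤ d' + pvWt (l.take i)) ∧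
      (pvIsBin (l.getD i ' ') = true → 2 ≤ d' + pvWt (l.take i)) := by
  subst hd'
  intro i hi
  have h' := h (i + 1) (by simpa using Nat.succ_lt_succ hi)
  simp only [List.getD_cons_succ, List.take_succ_cons, pvWt_cons] at h'
  constructor
  · intro he; have := h'.1 he; omega
  · intro he; have := h'.2 he; omega

theorem hok_head (c : Char) (l : List Char) (d : Int)
    (h : ∀ i < (c :: l).length,
      ((c :: l).getD i ' ' = '!' → 1 ≤ d + pvWt ((c :: l).take i)) ∧
      (pvIsBin ((c :: l).getD i ' ') = true → 2 ≤ d + pvWt ((c :: l).take i))) :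
    (c = '!' → 1 ≤ d) ∧ (pvIsBin c = true → 2 ≤ d) := by
  have h' := h 0 (by simp)
  simpa [pvWt_nil] using h'

theorem exists_one_of_le {α : Type} (st : List α) (h : (1:Int) ≤ st.length) :
    ∃ a t, st = a :: t := by
  match st with
  | [] => simp at h
  | a :: t => exact ⟨a, t, rfl⟩

theorem exists_two_of_le {α : Type} (st : List α) (h : (2:Int) ≤ st.length) :
    ∃ a b t, st = a :: b :: t := by
  match st with
  | [] => simp at h
  | [a] => simp at h
  | a :: b :: t => exact ⟨a, b, t, rfl⟩

theorem mainA (sets : List (List Int)) (toks : List Char) (st : List (PySem.Set Int))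
    (hidx : ∀ ch ∈ toks, PySem.Chars.isupper ch = true → (ch.toNat : Int) - 65 < (sets.length : Int))
    (hok : ∀ i < toks.length,
      (toks.getD i ' ' = '!' → 1 ≤ (st.length : Int) + pvWt (toks.take i)) ∧
      (pvIsBin (toks.getD i ' ') = true → 2 ≤ (st.length : Int) + pvWt (toks.take i)))
    (hinv : ∀ s ∈ st, s.Nodup ∧ ∀ y ∈ s, y ∈ PySem.Set.ofList sets.flatten) :
    ∃ st',
      toks.foldl (fun o ch => o.bind (fun t => evalStepA (PySem.Set.ofList sets.flatten) sets t ch)) (some st) = some st' ∧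
      (st'.length : Int) = (st.length : Int) + pvWt toks ∧
      (∀ s ∈ st', s.Nodup ∧ ∀ y ∈ s, y ∈ PySem.Set.ofList sets.flatten) ∧
      (∀ x ∈ PySem.Set.ofList sets.flatten,
        toks.foldl (stepB x sets) (st.map (fun s => decide (x ∈ s))) = st'.map (fun s => decide (x ∈ s))) := by
  induction toks generalizing st with
  | nil => exact ⟨st, rfl, by rw [pvWt_nil]; omega, hinv, fun x hx => rfl⟩
  | cons ch rest ih =>
    have hd := hok_head ch rest (st.length : Int) hok
    have hidx' : ∀ c ∈ rest, PySem.Chars.isupper c = true → (c.toNat : Int) - 65 < (sets.length : Int) :=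
      fun c hc => hidx c (List.mem_cons_of_mem _ hc)
    by_cases hu : PySem.Chars.isupper ch = true
    · have hδ : pvDelta ch = 1 := by simp [pvDelta, hu]
      have h65 := (upper_bounds ch hu).1
      have hlt := hidx ch List.mem_cons_self hu
      have hn : ch.toNat - 65 < sets.length := by omega
      have hcast : (ch.toNat : Int) - 65 = ((ch.toNat - 65 : Nat) : Int) := by omega
      have hS : (PySem.Set.ofList sets[ch.toNat - 65]).Nodup ∧
          ∀ y ∈ PySem.Set.ofList sets[ch.toNat - 65], y ∈ PySem.Set.ofList sets.flatten := by
        refine ⟨PySem.Set.nodup_ofList _, fun y hy => ?_⟩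
        rw [PySem.Set.mem_ofList] at hy ⊢
        exact List.mem_flatten.mpr ⟨sets[ch.toNat - 65], List.getElem_mem hn, hy⟩
      obtain ⟨st', hfold, hlen, hinv2, hB⟩ := ih (PySem.Set.ofList sets[ch.toNat - 65] :: st) hidx'
        (hok_tail ch rest _ _ (by simp only [hδ, List.length_cons]; push_cast; omega) hok)
        (by intro s hs
            rcases List.mem_cons.mp hs with rfl | hs
            · exact hS
            · exact hinv s hs)
      refine ⟨st', ?_, ?_, hinv2, ?_⟩
      · rw [List.foldl_cons]
        have hstep : evalStepA (PySem.Set.ofList sets.flatten) sets st ch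
            = some (PySem.Set.ofList sets[ch.toNat - 65] :: st) := by
          unfold evalStepA
          rw [if_pos hu, hcast, PySem.List.pyGet?_natCast, List.getElem?_eq_getElem hn]
        simpa [hstep] using hfold
      · rw [hlen, pvWt_cons, hδ]; simp only [List.length_cons]; push_cast; omega
      · intro x hx
        have hrec := hB x hx
        simp only [List.map_cons] at hrec ⊢
        rw [List.foldl_cons]
        have hstepb : stepB x sets (st.map (fun s => decide (x ∈ s))) ch
            = decide (x ∈ PySem.Set.ofList sets[ch.toNat - 65]) :: st.map (fun s => decide (x ∈ s)) := by
          unfold stepB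
          rw [if_pos hu, hcast, PySem.List.pyGetD_natCast, List.getD_eq_getElem sets [] hn]
          simp [PySem.Set.mem_ofList]
        rw [hstepb]
        exact hrec
    · by_cases he : ch = '!'
      · have hδ : pvDelta ch = 0 := by subst he; decide
        obtain ⟨op, rest', rfl⟩ := exists_one_of_le st (by have := hd.1 he; omega)
        obtain ⟨hon, hos⟩ := hinv op List.mem_cons_self
        have hS : (PySem.Set.diff (PySem.Set.ofList sets.flatten) op).Nodup ∧
            ∀ y ∈ PySem.Set.diff (PySem.Set.ofList sets.flatten) op, y ∈ PySem.Set.ofList sets.flatten :=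
          ⟨PySem.Set.nodup_diff _ _ (PySem.Set.nodup_ofList _),
           fun y hy => ((PySem.Set.mem_diff _ _ _).mp hy).1⟩
        obtain ⟨st', hfold, hlen, hinv2, hB⟩ := ih (PySem.Set.diff (PySem.Set.ofList sets.flatten) op :: rest') hidx'
          (hok_tail ch rest _ _ (by simp only [hδ, List.length_cons]; push_cast; omega) hok)
          (by intro s hs
              rcases List.mem_cons.mp hs with rfl | hs
              · exact hS
              · exact hinv s (by simp [hs]))
        refine ⟨st', ?_, ?_, hinv2, ?_⟩
        · rw [List.foldl_cons]
          have hstep : evalStepA (PySem.Set.ofList sets.flatten) sets (op :: rest') ch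
              = some (PySem.Set.diff (PySem.Set.ofList sets.flatten) op :: rest') := by
            unfold evalStepA
            rw [if_neg hu, if_pos he]
          simpa [hstep] using hfold
        · rw [hlen, pvWt_cons, hδ]; simp only [List.length_cons]; push_cast; omega
        · intro x hx
          have hrec := hB x hx
          simp only [List.map_cons] at hrec ⊢
          rw [List.foldl_cons]
          have hstepb : stepB x sets (decide (x ∈ op) :: rest'.map (fun s => decide (x ∈ s))) ch
              = decide (x ∈ PySem.Set.diff (PySem.Set.ofList sets.flatten) op) :: rest'.map (fun s => decide (x ∈ s)) := by
            unfold stepB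
            rw [if_neg hu, if_pos he]
            simp [popB, PySem.Set.mem_diff, hx]
          rw [hstepb]
          exact hrec
      · by_cases h1 : ch = '&'
        · have hbn : pvIsBin ch = true := by simp [pvIsBin, h1]
          have hδ : pvDelta ch = -1 := by simp [pvDelta, hu, hbn]
          obtain ⟨r, l, rest', rfl⟩ := exists_two_of_le st (hd.2 hbn)
          obtain ⟨hrn, hrs⟩ := hinv r List.mem_cons_self
          obtain ⟨hln, hls⟩ := hinv l (by simp)
          have hS : (PySem.Set.inter l r).Nodup ∧
              ∀ y ∈ (PySem.Set.inter l r), y ∈ PySem.Set.ofList sets.flatten := by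
            refine ⟨PySem.Set.nodup_inter l r hln, fun y hy => ?_⟩
            simp only [PySem.Set.mem_union, PySem.Set.mem_inter, PySem.Set.mem_diff] at hy
            tauto
          obtain ⟨st', hfold, hlen, hinv2, hB⟩ := ih ((PySem.Set.inter l r) :: rest') hidx'
            (hok_tail ch rest _ _ (by simp only [hδ, List.length_cons]; push_cast; omega) hok)
            (by intro s hs
                rcases List.mem_cons.mp hs with rfl | hs
                · exact hS
                · exact hinv s (by simp [hs]))
          refine ⟨st', ?_, ?_, hinv2, ?_⟩
          · rw [List.foldl_cons]
            have hstep : evalStepA (PySem.Set.ofList sets.flatten) sets (r :: l :: rest') ch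
                = some ((PySem.Set.inter l r) :: rest') := by
              unfold evalStepA
              rw [if_neg hu, if_neg he, if_pos h1]
            simpa [hstep] using hfold
          · rw [hlen, pvWt_cons, hδ]; simp only [List.length_cons]; push_cast; omega
          · intro x hx
            have hrec := hB x hx
            simp only [List.map_cons] at hrec ⊢
            rw [List.foldl_cons]
            have hstepb : stepB x sets
                (decide (x ∈ r) :: decide (x ∈ l) :: rest'.map (fun s => decide (x ∈ s))) ch
                = decide (x ∈ (PySem.Set.inter l r)) :: rest'.map (fun s => decide (x ∈ s)) := by
              unfold stepB
              rw [if_neg hu, if_neg he, if_pos h1]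
              by_cases hxl : x ∈ l <;> by_cases hxr : x ∈ r <;>
                simp [popB, PySem.Set.mem_inter, PySem.Set.mem_union, PySem.Set.mem_diff, hxl, hxr, hx]
            rw [hstepb]
            exact hrec
        · by_cases h2 : ch = '|'
          · have hbn : pvIsBin ch = true := by simp [pvIsBin, h2]
            have hδ : pvDelta ch = -1 := by simp [pvDelta, hu, hbn]
            obtain ⟨r, l, rest', rfl⟩ := exists_two_of_le st (hd.2 hbn)
            obtain ⟨hrn, hrs⟩ := hinv r List.mem_cons_self
            obtain ⟨hln, hls⟩ := hinv l (by simp)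
            have hS : (PySem.Set.union l r).Nodup ∧
                ∀ y ∈ (PySem.Set.union l r), y ∈ PySem.Set.ofList sets.flatten := by
              refine ⟨PySem.Set.nodup_union l r hln, fun y hy => ?_⟩
              simp only [PySem.Set.mem_union, PySem.Set.mem_inter, PySem.Set.mem_diff] at hy
              tauto
            obtain ⟨st', hfold, hlen, hinv2, hB⟩ := ih ((PySem.Set.union l r) :: rest') hidx'
              (hok_tail ch rest _ _ (by simp only [hδ, List.length_cons]; push_cast; omega) hok)
              (by intro s hs
                  rcases List.mem_cons.mp hs with rfl | hs
                  · exact hS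
                  · exact hinv s (by simp [hs]))
            refine ⟨st', ?_, ?_, hinv2, ?_⟩
            · rw [List.foldl_cons]
              have hstep : evalStepA (PySem.Set.ofList sets.flatten) sets (r :: l :: rest') ch
                  = some ((PySem.Set.union l r) :: rest') := by
                unfold evalStepA
                rw [if_neg hu, if_neg he, if_neg h1, if_pos h2]
              simpa [hstep] using hfold
            · rw [hlen, pvWt_cons, hδ]; simp only [List.length_cons]; push_cast; omega
            · intro x hx
              have hrec := hB x hx
              simp only [List.map_cons] at hrec ⊢
              rw [List.foldl_cons]
              have hstepb : stepB x sets
                  (decide (x ∈ r) :: decide (x ∈ l) :: rest'.map (fun s => decide (x ∈ s))) ch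
                  = decide (x ∈ (PySem.Set.union l r)) :: rest'.map (fun s => decide (x ∈ s)) := by
                unfold stepB
                rw [if_neg hu, if_neg he, if_neg h1, if_pos h2]
                by_cases hxl : x ∈ l <;> by_cases hxr : x ∈ r <;>
                  simp [popB, PySem.Set.mem_inter, PySem.Set.mem_union, PySem.Set.mem_diff, hxl, hxr, hx]
              rw [hstepb]
              exact hrec
          · by_cases h3 : ch = '^'
            · have hbn : pvIsBin ch = true := by simp [pvIsBin, h3]
              have hδ : pvDelta ch = -1 := by simp [pvDelta, hu, hbn]
              obtain ⟨r, l, rest', rfl⟩ := exists_two_of_le st (hd.2 hbn)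
              obtain ⟨hrn, hrs⟩ := hinv r List.mem_cons_self
              obtain ⟨hln, hls⟩ := hinv l (by simp)
              have hS : (PySem.Set.diff (PySem.Set.union l r) (PySem.Set.inter l r)).Nodup ∧
                  ∀ y ∈ (PySem.Set.diff (PySem.Set.union l r) (PySem.Set.inter l r)), y ∈ PySem.Set.ofList sets.flatten := by
                refine ⟨PySem.Set.nodup_diff _ _ (PySem.Set.nodup_union l r hln), fun y hy => ?_⟩
                simp only [PySem.Set.mem_union, PySem.Set.mem_inter, PySem.Set.mem_diff] at hy
                tauto
              obtain ⟨st', hfold, hlen, hinv2, hB⟩ := ih ((PySem.Set.diff (PySem.Set.union l r) (PySem.Set.inter l r)) :: rest') hidx'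
                (hok_tail ch rest _ _ (by simp only [hδ, List.length_cons]; push_cast; omega) hok)
                (by intro s hs
                    rcases List.mem_cons.mp hs with rfl | hs
                    · exact hS
                    · exact hinv s (by simp [hs]))
              refine ⟨st', ?_, ?_, hinv2, ?_⟩
              · rw [List.foldl_cons]
                have hstep : evalStepA (PySem.Set.ofList sets.flatten) sets (r :: l :: rest') ch
                    = some ((PySem.Set.diff (PySem.Set.union l r) (PySem.Set.inter l r)) :: rest') := by
                  unfold evalStepA
                  rw [if_neg hu, if_neg he, if_neg h1, if_neg h2, if_pos h3]
                simpa [hstep] using hfold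
              · rw [hlen, pvWt_cons, hδ]; simp only [List.length_cons]; push_cast; omega
              · intro x hx
                have hrec := hB x hx
                simp only [List.map_cons] at hrec ⊢
                rw [List.foldl_cons]
                have hstepb : stepB x sets
                    (decide (x ∈ r) :: decide (x ∈ l) :: rest'.map (fun s => decide (x ∈ s))) ch
                    = decide (x ∈ (PySem.Set.diff (PySem.Set.union l r) (PySem.Set.inter l r))) :: rest'.map (fun s => decide (x ∈ s)) := by
                  unfold stepB
                  rw [if_neg hu, if_neg he, if_neg h1, if_neg h2, if_pos h3]
                  by_cases hxl : x ∈ l <;> by_cases hxr : x ∈ r <;>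
                    simp [popB, PySem.Set.mem_inter, PySem.Set.mem_union, PySem.Set.mem_diff, hxl, hxr, hx]
                rw [hstepb]
                exact hrec
            · by_cases h4 : ch = '>'
              · have hbn : pvIsBin ch = true := by simp [pvIsBin, h4]
                have hδ : pvDelta ch = -1 := by simp [pvDelta, hu, hbn]
                obtain ⟨r, l, rest', rfl⟩ := exists_two_of_le st (hd.2 hbn)
                obtain ⟨hrn, hrs⟩ := hinv r List.mem_cons_self
                obtain ⟨hln, hls⟩ := hinv l (by simp)
                have hS : (PySem.Set.union (PySem.Set.diff (PySem.Set.ofList sets.flatten) l) r).Nodup ∧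
                    ∀ y ∈ (PySem.Set.union (PySem.Set.diff (PySem.Set.ofList sets.flatten) l) r), y ∈ PySem.Set.ofList sets.flatten := by
                  refine ⟨PySem.Set.nodup_union _ r (PySem.Set.nodup_diff _ _ (PySem.Set.nodup_ofList _)), fun y hy => ?_⟩
                  simp only [PySem.Set.mem_union, PySem.Set.mem_inter, PySem.Set.mem_diff] at hy
                  tauto
                obtain ⟨st', hfold, hlen, hinv2, hB⟩ := ih ((PySem.Set.union (PySem.Set.diff (PySem.Set.ofList sets.flatten) l) r) :: rest') hidx'
                  (hok_tail ch rest _ _ (by simp only [hδ, List.length_cons]; push_cast; omega) hok)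
                  (by intro s hs
                      rcases List.mem_cons.mp hs with rfl | hs
                      · exact hS
                      · exact hinv s (by simp [hs]))
                refine ⟨st', ?_, ?_, hinv2, ?_⟩
                · rw [List.foldl_cons]
                  have hstep : evalStepA (PySem.Set.ofList sets.flatten) sets (r :: l :: rest') ch
                      = some ((PySem.Set.union (PySem.Set.diff (PySem.Set.ofList sets.flatten) l) r) :: rest') := by
                    unfold evalStepA
                    rw [if_neg hu, if_neg he, if_neg h1, if_neg h2, if_neg h3, if_pos h4]
                  simpa [hstep] using hfold
                · rw [hlen, pvWt_cons, hδ]; simp only [List.length_cons]; push_cast; omega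
                · intro x hx
                  have hrec := hB x hx
                  simp only [List.map_cons] at hrec ⊢
                  rw [List.foldl_cons]
                  have hstepb : stepB x sets
                      (decide (x ∈ r) :: decide (x ∈ l) :: rest'.map (fun s => decide (x ∈ s))) ch
                      = decide (x ∈ (PySem.Set.union (PySem.Set.diff (PySem.Set.ofList sets.flatten) l) r)) :: rest'.map (fun s => decide (x ∈ s)) := by
                    unfold stepB
                    rw [if_neg hu, if_neg he, if_neg h1, if_neg h2, if_neg h3, if_pos h4]
                    by_cases hxl : x ∈ l <;> by_cases hxr : x ∈ r <;>
                      simp [popB, PySem.Set.mem_inter, PySem.Set.mem_union, PySem.Set.mem_diff, hxl, hxr, hx]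
                  rw [hstepb]
                  exact hrec
              · by_cases h5 : ch = '='
                · have hbn : pvIsBin ch = true := by simp [pvIsBin, h5]
                  have hδ : pvDelta ch = -1 := by simp [pvDelta, hu, hbn]
                  obtain ⟨r, l, rest', rfl⟩ := exists_two_of_le st (hd.2 hbn)
                  obtain ⟨hrn, hrs⟩ := hinv r List.mem_cons_self
                  obtain ⟨hln, hls⟩ := hinv l (by simp)
                  have hS : (PySem.Set.union (PySem.Set.inter l r) (PySem.Set.diff (PySem.Set.ofList sets.flatten) (PySem.Set.union l r))).Nodup ∧
                      ∀ y ∈ (PySem.Set.union (PySem.Set.inter l r) (PySem.Set.diff (PySem.Set.ofList sets.flatten) (PySem.Set.union l r))), y ∈ PySem.Set.ofList sets.flatten := by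
                    refine ⟨PySem.Set.nodup_union _ _ (PySem.Set.nodup_inter l r hln), fun y hy => ?_⟩
                    simp only [PySem.Set.mem_union, PySem.Set.mem_inter, PySem.Set.mem_diff] at hy
                    tauto
                  obtain ⟨st', hfold, hlen, hinv2, hB⟩ := ih ((PySem.Set.union (PySem.Set.inter l r) (PySem.Set.diff (PySem.Set.ofList sets.flatten) (PySem.Set.union l r))) :: rest') hidx'
                    (hok_tail ch rest _ _ (by simp only [hδ, List.length_cons]; push_cast; omega) hok)
                    (by intro s hs
                        rcases List.mem_cons.mp hs with rfl | hs
                        · exact hS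
                        · exact hinv s (by simp [hs]))
                  refine ⟨st', ?_, ?_, hinv2, ?_⟩
                  · rw [List.foldl_cons]
                    have hstep : evalStepA (PySem.Set.ofList sets.flatten) sets (r :: l :: rest') ch
                        = some ((PySem.Set.union (PySem.Set.inter l r) (PySem.Set.diff (PySem.Set.ofList sets.flatten) (PySem.Set.union l r))) :: rest') := by
                      unfold evalStepA
                      rw [if_neg hu, if_neg he, if_neg h1, if_neg h2, if_neg h3, if_neg h4, if_pos h5]
                    simpa [hstep] using hfold
                  · rw [hlen, pvWt_cons, hδ]; simp only [List.length_cons]; push_cast; omega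
                  · intro x hx
                    have hrec := hB x hx
                    simp only [List.map_cons] at hrec ⊢
                    rw [List.foldl_cons]
                    have hstepb : stepB x sets
                        (decide (x ∈ r) :: decide (x ∈ l) :: rest'.map (fun s => decide (x ∈ s))) ch
                        = decide (x ∈ (PySem.Set.union (PySem.Set.inter l r) (PySem.Set.diff (PySem.Set.ofList sets.flatten) (PySem.Set.union l r)))) :: rest'.map (fun s => decide (x ∈ s)) := by
                      unfold stepB
                      rw [if_neg hu, if_neg he, if_neg h1, if_neg h2, if_neg h3, if_neg h4, if_pos h5]
                      by_cases hxl : x ∈ l <;> by_cases hxr : x ∈ r <;>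
                        simp [popB, PySem.Set.mem_inter, PySem.Set.mem_union, PySem.Set.mem_diff, hxl, hxr, hx]
                    rw [hstepb]
                    exact hrec
                · have hbn : pvIsBin ch = false := by simp [pvIsBin, h1, h2, h3, h4, h5]
                  have hδ : pvDelta ch = 0 := by simp [pvDelta, hu, hbn]
                  obtain ⟨st', hfold, hlen, hinv2, hB⟩ := ih st hidx'
                    (hok_tail ch rest _ _ (by simp only [hδ]; omega) hok) hinv
                  refine ⟨st', ?_, ?_, hinv2, ?_⟩
                  · rw [List.foldl_cons]
                    have hstep : evalStepA (PySem.Set.ofList sets.flatten) sets st ch = some st := by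
                      unfold evalStepA
                      rw [if_neg hu, if_neg he, if_neg h1, if_neg h2, if_neg h3, if_neg h4, if_neg h5]
                    simpa [hstep] using hfold
                  · rw [hlen, pvWt_cons, hδ]; omega
                  · intro x hx
                    have hrec := hB x hx
                    rw [List.foldl_cons]
                    have hstepb : stepB x sets (st.map (fun s => decide (x ∈ s))) ch
                        = st.map (fun s => decide (x ∈ s)) := by
                      unfold stepB
                      rw [if_neg hu, if_neg he, if_neg h1, if_neg h2, if_neg h3, if_neg h4, if_neg h5]
                    rw [hstepb]
                    exact hrec


theorem mainB (sets : List (List Int)) (toks : List Char) (d : Int)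
    (hidx : ∀ ch ∈ toks, PySem.Chars.isupper ch = true → (ch.toNat : Int) - 65 < (sets.length : Int))
    (hok : ∀ i < toks.length,
      (toks.getD i ' ' = '!' → 1 ≤ d + pvWt (toks.take i)) ∧
      (pvIsBin (toks.getD i ' ') = true → 2 ≤ d + pvWt (toks.take i))) :
    checkB sets toks d = some (d + pvWt toks) := by
  induction toks generalizing d with
  | nil => simp [checkB, pvWt_nil]
  | cons ch rest ih =>
    have hd := hok_head ch rest d hok
    have hidx' : ∀ c ∈ rest, PySem.Chars.isupper c = true → (c.toNat : Int) - 65 < (sets.length : Int) :=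
      fun c hc => hidx c (List.mem_cons_of_mem _ hc)
    rw [checkB]
    by_cases hu : PySem.Chars.isupper ch = true
    · have hb := hidx ch (List.mem_cons_self) hu
      have hδ : pvDelta ch = 1 := by simp [pvDelta, hu]
      rw [if_pos hu, if_neg (by omega)]
      rw [ih (d + 1) hidx' (hok_tail ch rest d (d + 1) (by rw [hδ]) hok)]
      congr 1
      rw [pvWt_cons, hδ]; omega
    · rw [if_neg hu]
      by_cases he : ch = '!'
      · have hδ : pvDelta ch = 0 := by subst he; decide
        rw [if_pos he, if_neg (by have := hd.1 he; omega)]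
        rw [ih d hidx' (hok_tail ch rest d d (by simp only [hδ]; omega) hok)]
        congr 1
        rw [pvWt_cons, hδ]; omega
      · rw [if_neg he]
        by_cases hbn : pvIsBin ch = true
        · have hδ : pvDelta ch = -1 := by simp [pvDelta, hu, hbn]
          rw [if_pos hbn, if_neg (by have := hd.2 hbn; omega)]
          rw [ih (d - 1) hidx' (hok_tail ch rest d (d - 1) (by simp only [hδ]; omega) hok)]
          congr 1
          rw [pvWt_cons, hδ]; omega
        · have hδ : pvDelta ch = 0 := by simp [pvDelta, hu, hbn]
          rw [if_neg hbn]
          rw [ih d hidx' (hok_tail ch rest d d (by simp only [hδ]; omega) hok)]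
          congr 1
          rw [pvWt_cons, hδ]; omega

-- ===== VERDICT (by name: the statement is the Claim_ definition above) =====
theorem eval_set_spec : Claim_equal_eval_set := by
  intro formula sets _ hpre
  obtain ⟨hidx0, hwt, hok⟩ := hpre
  have hidx : ∀ ch ∈ formula.toList, PySem.Chars.isupper ch = true → (ch.toNat : Int) - 65 < (sets.length : Int) := by
    intro ch hc hup
    have hb := (List.all_eq_true.mp hidx0) ch hc
    simp [hup] at hb
    have h65 := (upper_bounds ch hup).1
    omega
  show eval_set formula sets = eval_set_alt formula sets
  obtain ⟨st', hfold, hlen, hinv, hB⟩ :=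
    mainA sets formula.toList [] hidx (by simpa using hok) (by simp)
  have hchk := mainB sets formula.toList 0 hidx (by simpa using hok)
  rw [hwt] at hchk hlen
  have hlen1 : st'.length = 1 := by simp at hlen; omega
  obtain ⟨s, rfl⟩ : ∃ s, st' = [s] := by
    match st', hlen1 with
    | [s], _ => exact ⟨s, rfl⟩
  have hsub : ∀ y ∈ s, y ∈ PySem.Set.ofList sets.flatten := (hinv s (by simp)).2
  have hnd : s.Nodup := (hinv s (by simp)).1
  simp only [eval_set, eval_set_alt]
  rw [hfold, hchk]
  norm_num
  have hcong : ∀ x ∈ PySem.List.sorted (PySem.Set.ofList sets.flatten) (fun x => x),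
      evalTopB x sets formula.toList = decide (x ∈ s) := by
    intro x hx
    rw [PySem.List.mem_sorted] at hx
    have hr := hB x hx
    simp only [List.map_nil, List.map_cons] at hr
    simp [evalTopB, hr]
  rw [List.filter_congr hcong]
  apply PySem.List.sorted_eq_of_perm_of_pairwise_lt
  · rw [List.perm_ext_iff_of_nodup
      (List.Nodup.filter _ ((PySem.List.sorted_perm _ _ _).symm.nodup (PySem.Set.nodup_ofList _))) hnd]
    intro a
    simp only [List.mem_filter, PySem.List.mem_sorted, decide_eq_true_eq]
    exact ⟨fun h => h.2, fun h => ⟨hsub a h, h⟩⟩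
  · exact List.Pairwise.filter _ (PySem.List.sorted_ofList_pairwise_lt _)
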